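-- pv_equiv track=rewrite | github.com/agh-bit-academy/SummerProject2022 | WDI/Zestaw_3/Zadanie_12/sol.py | f
-- ===== SOURCE A (Python) =====
-- def f(A):
--     max_asc_len = 0
--     asc_len = 0
--     max_desc_len = 0
--     desc_len = 0
--     prev = 0
--     for i in range(1, len(A)):
--         diff = A[i] - A[i - 1]
--         if diff > 0:
--             if diff == prev:
--                 asc_len += 1
--             else:
--                 asc_len = 2
--                 desc_len = 0
--         elif diff < 0:
--             if diff == prev:
--                 desc_len += 1
--             else:
--                 desc_len = 2
--                 asc_len = 0
--         max_asc_len = max(max_asc_len, asc_len)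
--         max_desc_len = max(max_desc_len, desc_len)
--         prev = diff
--     return max_asc_len - max_desc_len
-- ===== SOURCE B (Python) =====
-- def f(A):
--     # run-length-encode the consecutive differences, then measure each run
--     diffs = [A[i] - A[i - 1] for i in range(1, len(A))]
--     groups = []  # run-length encoding of diffs; the most recent run sits at groups[-1]
--     for d in diffs:
--         if groups and groups[-1][0] == d:
--             groups[-1] = (d, groups[-1][1] + 1)
--         else:
--             groups.append((d, 1))
--     max_asc = 0
--     max_desc = 0
--     for v, m in groups:
--         if v > 0:
--             max_asc = max(max_asc, m + 1)
--         elif v < 0: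
--             max_desc = max(max_desc, m + 1)
--     return max_asc - max_desc
-- ===== Notes on version B (the rewrite author's own statement) =====
-- stated objective: alternative
-- what changed: Replaces A's incremental five-variable state machine with a two-pass group-then-measure decomposition: build the differences list, run-length-encode maximal runs of equal diffs, then take max(run+1) over positive and over negative runs.
import Mathlib
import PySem

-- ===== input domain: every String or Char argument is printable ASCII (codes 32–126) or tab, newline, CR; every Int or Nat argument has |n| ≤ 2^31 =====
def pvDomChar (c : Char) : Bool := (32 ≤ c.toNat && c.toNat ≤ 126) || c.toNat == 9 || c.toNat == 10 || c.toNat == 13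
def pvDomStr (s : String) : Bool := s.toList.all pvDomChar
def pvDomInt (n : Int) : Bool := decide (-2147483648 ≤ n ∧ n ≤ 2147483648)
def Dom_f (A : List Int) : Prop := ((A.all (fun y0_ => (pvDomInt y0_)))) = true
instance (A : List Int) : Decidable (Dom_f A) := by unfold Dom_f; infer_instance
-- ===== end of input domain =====

-- B re-implements A by run-length-encoding the consecutive differences and measuring
-- each run, instead of A's incremental five-variable state machine (objective: alternative).

-- ===== PORT A =====
-- state = (max_asc_len, asc_len, max_desc_len, desc_len, prev), exactly A's variables
def fStep : (Int × Int × Int × Int × Int) → Int → (Int × Int × Int × Int × Int)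
  | (ma, a, md, d, prev), diff =>
    let a' := if 0 < diff then (if diff = prev then a + 1 else 2)
              else if diff < 0 then (if diff = prev then a else 0)
              else a
    let d' := if 0 < diff then (if diff = prev then d else 0)
              else if diff < 0 then (if diff = prev then d + 1 else 2)
              else d
    (max ma a', a', max md d', d', diff)

-- A[i], A[i-1] with i ∈ range(1, len(A)) are always in range, so pyGetD's default is never used
def f (A : List Int) : Int :=
  let st := (PySem.List.pyRange 1 (A.length : Int) 1).foldl
    (fun st i => fStep st (PySem.List.pyGetD A i 0 - PySem.List.pyGetD A (i - 1) 0))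
    (0, 0, 0, 0, 0)
  st.1 - st.2.2.1

-- ===== PORT B =====
-- Source B keeps the most recent run at the end of the list (groups[-1], appended in O(1));
-- the Lean list keeps that stack top at the head (cons), the natural list transliteration
def bGroup (groups : List (Int × Int)) (d : Int) : List (Int × Int) :=
  match groups with
  | (v, m) :: rest => if v = d then (d, m + 1) :: rest else (d, 1) :: (v, m) :: rest
  | [] => [(d, 1)]

def bMeasure (p : Int × Int) (g : Int × Int) : Int × Int :=
  if 0 < g.1 then (max p.1 (g.2 + 1), p.2)
  else if g.1 < 0 then (p.1, max p.2 (g.2 + 1))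
  else p

def f_alt (A : List Int) : Int :=
  let diffs := (PySem.List.pyRange 1 (A.length : Int) 1).map
    (fun i => PySem.List.pyGetD A i 0 - PySem.List.pyGetD A (i - 1) 0)
  let groups := diffs.foldl bGroup []
  let p := groups.foldl bMeasure (0, 0)
  p.1 - p.2

-- ===== PRECONDITION & SPEC =====
def Spec_f (A : List Int) (out : Int) : Prop := out = f_alt A
instance (A : List Int) (out : Int) : Decidable (Spec_f A out) := by unfold Spec_f; infer_instance

-- ===== CLAIM (what is proved, stated in full; the proofs are below) =====
def Claim_equal_f : Prop := ∀ (A : List Int), Dom_f A → Spec_f A (f A)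

-- ===== LEMMAS AND PROOFS =====

-- maximum ascending-run measure (m+1 over positive-valued runs) of a group list
def MAg : List (Int × Int) → Int
  | [] => 0
  | (v, m) :: rest => max (if 0 < v then m + 1 else 0) (MAg rest)

def MDg : List (Int × Int) → Int
  | [] => 0
  | (v, m) :: rest => max (if v < 0 then m + 1 else 0) (MDg rest)

def headVal : List (Int × Int) → Int
  | [] => 0
  | (v, _) :: _ => v

theorem MAg_nonneg (g : List (Int × Int)) : 0 ≤ MAg g := by
  induction g with
  | nil => simp [MAg]
  | cons h t ih => obtain ⟨v, m⟩ := h; simp [MAg]; omega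

theorem MDg_nonneg (g : List (Int × Int)) : 0 ≤ MDg g := by
  induction g with
  | nil => simp [MDg]
  | cons h t ih => obtain ⟨v, m⟩ := h; simp [MDg]; omega

-- the invariant tying A's running state to B's (reversed) run-length encoding
def StInv (a d ma md prev : Int) (g : List (Int × Int)) : Prop :=
  ma = MAg g ∧ md = MDg g ∧ a ≤ ma ∧ d ≤ md ∧ prev = headVal g ∧
  ∀ v m rest, g = (v, m) :: rest → (0 < v → a = m + 1) ∧ (v < 0 → d = m + 1)

theorem step_preserve (x a d ma md prev : Int) (g : List (Int × Int))
    (h : StInv a d ma md prev g) :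
    ∃ a' d', fStep (ma, a, md, d, prev) x = (max ma a', a', max md d', d', x) ∧
      StInv a' d' (max ma a') (max md d') x (bGroup g x) := by
  obtain ⟨h1, h2, h3, h4, h5, h6⟩ := h
  match g with
  | [] =>
    simp only [headVal] at h5
    simp only [MAg, MDg] at h1 h2
    by_cases hx : 0 < x
    · have hne : ¬ x = prev := by omega
      refine ⟨2, 0, by simp [fStep, hx, hne], ?_, ?_, by omega, by omega, by simp [bGroup, headVal], ?_⟩
      · simp [bGroup, MAg, hx]; omega
      · have hnn : ¬ x < 0 := by omega
        simp [bGroup, MDg, hnn]; omega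
      · intro v' m' rest' hg
        simp [bGroup] at hg
        constructor <;> intro <;> omega
    · by_cases hn : x < 0
      · have hne : ¬ x = prev := by omega
        refine ⟨0, 2, by simp [fStep, hx, hn, hne], ?_, ?_, by omega, by omega, by simp [bGroup, headVal], ?_⟩
        · have hnp : ¬ 0 < x := by omega
          simp [bGroup, MAg, hnp]; omega
        · simp [bGroup, MDg, hn]; omega
        · intro v' m' rest' hg
          simp [bGroup] at hg
          constructor <;> intro <;> omega
      · have hx0 : x = 0 := by omega
        subst hx0
        refine ⟨a, d, by simp [fStep], ?_, ?_, by omega, by omega, by simp [bGroup, headVal], ?_⟩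
        · simp [bGroup, MAg]; omega
        · simp [bGroup, MDg]; omega
        · intro v' m' rest' hg
          simp [bGroup] at hg
          constructor <;> intro <;> omega
  | (v, m) :: rest =>
    have hend := h6 v m rest rfl
    simp only [headVal] at h5
    have hA := MAg_nonneg rest
    have hD := MDg_nonneg rest
    by_cases hx : 0 < x
    · by_cases he : x = v
      · -- continue the positive run
        have hv : 0 < v := by omega
        have hnv : ¬ v < 0 := by omega
        have hnn : ¬ x < 0 := by omega
        have hp : 0 < prev := by omega
        have hvx : v = x := he.symm
        have ha : a = m + 1 := hend.1 hv
        have h1' : ma = max (m + 1) (MAg rest) := by rw [h1]; simp [MAg, hv]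
        have h2' : md = max 0 (MDg rest) := by rw [h2]; simp [MDg, hnv]
        refine ⟨a + 1, d, by simp [fStep, he ▸ h5, hx], ?_, ?_, by omega, by omega,
          by simp [bGroup, hvx, headVal], ?_⟩
        · simp [bGroup, hvx, MAg, hx]; omega
        · simp [bGroup, hvx, MDg, hnn]; omega
        · intro v' m' rest' hg
          simp [bGroup, hvx] at hg
          constructor <;> intro <;> omega
      · -- start a new positive run
        have hne : ¬ x = prev := by omega
        have hnvx : ¬ v = x := fun hh => he hh.symm
        have hnn : ¬ x < 0 := by omega
        have h1' : ma = max (if 0 < v then m + 1 else 0) (MAg rest) := by rw [h1]; simp [MAg]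
        have h2' : md = max (if v < 0 then m + 1 else 0) (MDg rest) := by rw [h2]; simp [MDg]
        refine ⟨2, 0, by simp [fStep, hx, hne], ?_, ?_, by omega, by omega,
          by simp [bGroup, hnvx, headVal], ?_⟩
        · simp [bGroup, hnvx, MAg, hx]; omega
        · simp [bGroup, hnvx, MDg, hnn]; omega
        · intro v' m' rest' hg
          simp [bGroup, hnvx] at hg
          constructor <;> intro <;> omega
    · by_cases hn : x < 0
      · by_cases he : x = v
        · -- continue the negative run
          have hv : v < 0 := by omega
          have hnv : ¬ 0 < v := by omega
          have hp : prev < 0 := by omega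
          have hnp : ¬ 0 < prev := by omega
          have hnpx : ¬ 0 < x := by omega
          have hvx : v = x := he.symm
          have hd : d = m + 1 := hend.2 hv
          have h1' : ma = max 0 (MAg rest) := by rw [h1]; simp [MAg, hnv]
          have h2' : md = max (m + 1) (MDg rest) := by rw [h2]; simp [MDg, hv]
          refine ⟨a, d + 1, by simp [fStep, he ▸ h5, hnpx, hn], ?_, ?_, by omega, by omega,
            by simp [bGroup, hvx, headVal], ?_⟩
          · simp [bGroup, hvx, MAg, hnpx]; omega
          · simp [bGroup, hvx, MDg, hn]; omega
          · intro v' m' rest' hg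
            simp [bGroup, hvx] at hg
            constructor <;> intro <;> omega
        · -- start a new negative run
          have hne : ¬ x = prev := by omega
          have hnvx : ¬ v = x := fun hh => he hh.symm
          have hnpx : ¬ 0 < x := by omega
          have h1' : ma = max (if 0 < v then m + 1 else 0) (MAg rest) := by rw [h1]; simp [MAg]
          have h2' : md = max (if v < 0 then m + 1 else 0) (MDg rest) := by rw [h2]; simp [MDg]
          refine ⟨0, 2, by simp [fStep, hnpx, hn, hne], ?_, ?_, by omega, by omega,
            by simp [bGroup, hnvx, headVal], ?_⟩
          · simp [bGroup, hnvx, MAg, hnpx]; omega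
          · simp [bGroup, hnvx, MDg, hn]; omega
          · intro v' m' rest' hg
            simp [bGroup, hnvx] at hg
            constructor <;> intro <;> omega
      · -- zero difference: A's state is unchanged
        have hx0 : x = 0 := by omega
        subst hx0
        by_cases hvx : v = 0
        · subst hvx
          have h1' : ma = max 0 (MAg rest) := by rw [h1]; simp [MAg]
          have h2' : md = max 0 (MDg rest) := by rw [h2]; simp [MDg]
          refine ⟨a, d, by simp [fStep], ?_, ?_, by omega, by omega,
            by simp [bGroup, headVal], ?_⟩
          · simp [bGroup, MAg]; omega
          · simp [bGroup, MDg]; omega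
          · intro v' m' rest' hg
            simp [bGroup] at hg
            constructor <;> intro <;> omega
        · have h1' : ma = max (if 0 < v then m + 1 else 0) (MAg rest) := by rw [h1]; simp [MAg]
          have h2' : md = max (if v < 0 then m + 1 else 0) (MDg rest) := by rw [h2]; simp [MDg]
          refine ⟨a, d, by simp [fStep], ?_, ?_, by omega, by omega,
            by simp [bGroup, hvx, headVal], ?_⟩
          · simp [bGroup, hvx, MAg]; omega
          · simp [bGroup, hvx, MDg]; omega
          · intro v' m' rest' hg
            simp [bGroup, hvx] at hg
            constructor <;> intro <;> omega

theorem main_inv (L : List Int) : ∀ (g : List (Int × Int)) (ma a md d prev : Int),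
    StInv a d ma md prev g →
    (L.foldl fStep (ma, a, md, d, prev)).1 = MAg (L.foldl bGroup g) ∧
    (L.foldl fStep (ma, a, md, d, prev)).2.2.1 = MDg (L.foldl bGroup g) := by
  induction L with
  | nil =>
    intro g ma a md d prev hInv
    obtain ⟨h1, h2, _⟩ := hInv
    simpa using ⟨h1, h2⟩
  | cons x L ih =>
    intro g ma a md d prev hInv
    obtain ⟨a', d', hf, hinv'⟩ := step_preserve x a d ma md prev g hInv
    rw [List.foldl_cons, List.foldl_cons, hf]
    exact ih _ _ _ _ _ _ hinv'

theorem measure_fold (g : List (Int × Int)) : ∀ (p q : Int), 0 ≤ p → 0 ≤ q →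
    g.foldl bMeasure (p, q) = (max p (MAg g), max q (MDg g)) := by
  induction g with
  | nil =>
    intro p q hp hq
    simp [MAg, MDg]
    omega
  | cons h t ih =>
    intro p q hp hq
    obtain ⟨v, m⟩ := h
    have n1 := MAg_nonneg t
    have n2 := MDg_nonneg t
    by_cases hv : 0 < v
    · have hv2 : ¬ (v < 0) := by omega
      rw [List.foldl_cons]
      simp only [bMeasure, hv, hv2, if_pos, ite_false]
      rw [ih (max p (m + 1)) q (by omega) hq]
      simp [MAg, MDg, hv, hv2, Prod.ext_iff]
      omega
    · by_cases hn : v < 0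
      · rw [List.foldl_cons]
        simp only [bMeasure, hv, hn, ite_false, if_true]
        rw [ih p (max q (m + 1)) hp (by omega)]
        simp [MAg, MDg, hv, hn, Prod.ext_iff]
        omega
      · rw [List.foldl_cons]
        simp only [bMeasure, hv, hn, ite_false, if_true]
        rw [ih p q hp hq]
        simp [MAg, MDg, hv, hn, Prod.ext_iff]
        omega

-- ===== VERDICT (by name: the statement is the Claim_ definition above) =====
theorem f_spec : Claim_equal_f := by
  intro A _
  show f A = f_alt A
  simp only [f, f_alt]
  rw [show List.foldl
        (fun st i => fStep st (PySem.List.pyGetD A i 0 - PySem.List.pyGetD A (i - 1) 0))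
        (0, 0, 0, 0, 0) (PySem.List.pyRange 1 (A.length : Int) 1) =
      List.foldl fStep (0, 0, 0, 0, 0)
        ((PySem.List.pyRange 1 (A.length : Int) 1).map
          (fun i => PySem.List.pyGetD A i 0 - PySem.List.pyGetD A (i - 1) 0))
    from by rw [List.foldl_map]]
  obtain ⟨e1, e2⟩ := main_inv
    ((PySem.List.pyRange 1 (A.length : Int) 1).map
      (fun i => PySem.List.pyGetD A i 0 - PySem.List.pyGetD A (i - 1) 0))
    [] 0 0 0 0 0
    (by refine ⟨rfl, rfl, le_refl _, le_refl _, rfl, ?_⟩; intro v m rest h; cases h)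
  rw [e1, e2, measure_fold _ 0 0 (le_refl 0) (le_refl 0)]
  have h1 := MAg_nonneg (((PySem.List.pyRange 1 (A.length : Int) 1).map
      (fun i => PySem.List.pyGetD A i 0 - PySem.List.pyGetD A (i - 1) 0)).foldl bGroup [])
  have h2 := MDg_nonneg (((PySem.List.pyRange 1 (A.length : Int) 1).map
      (fun i => PySem.List.pyGetD A i 0 - PySem.List.pyGetD A (i - 1) 0)).foldl bGroup [])
  simp only [max_eq_right h1, max_eq_right h2]
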